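-- pv_equiv track=rewrite | github.com/erhelito/TIPE-LIFI | prog/convertors.py | binary_to_ascii
-- ===== SOURCE A (Python) =====
-- def binary_convertor_to_str(values:list) -> str:
--     """Convert a boolean list to a string of binary digits (0/1)."""
--     output_str = ""
--     for value in values:
--         if value:
--             output_str += '1'
--         else:
--             output_str += '0'
--     return output_str
--
-- def binary_to_ascii(binary_message:list) -> str:
--     """Convert a boolean list to a string of ASCII characters."""
--     ascii_message = ""
--     binary_message = binary_convertor_to_str(binary_message)
--
--     # parse the binary string into groups of 8 bits
--     for i in range(0, len(binary_message), 8):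
--         bit = binary_message[i:i+8]
--
--         # convert the 8 bits to an integer, convert the integer to an ASCII character
--         ascii_char = chr(int(bit, 2))
--         ascii_message += ascii_char
--
--     return ascii_message
-- ===== SOURCE B (Python) =====
-- def binary_to_ascii(binary_message: list) -> str:
--     """Convert a boolean list to a string of ASCII characters (single pass, no intermediate bit-string)."""
--     chars = []
--     acc = 0
--     cnt = 0
--     for value in binary_message:
--         acc = acc * 2 + (1 if value else 0)
--         cnt += 1
--         if cnt == 8:
--             chars.append(chr(acc))
--             acc = 0
--             cnt = 0
--     if cnt:
--         chars.append(chr(acc))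
--     return ''.join(chars)
-- ===== Notes on version B (the rewrite author's own statement) =====
-- stated objective: simpler
-- what changed: Replaced A's two-stage pipeline (build a '0'/'1' string, then slice it into 8-char groups and re-parse each with int(bit, 2)) by a single pass over the boolean list keeping an integer accumulator and a bit counter, emitting a character every 8 bits and flushing a partial final group.
import Mathlib
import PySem

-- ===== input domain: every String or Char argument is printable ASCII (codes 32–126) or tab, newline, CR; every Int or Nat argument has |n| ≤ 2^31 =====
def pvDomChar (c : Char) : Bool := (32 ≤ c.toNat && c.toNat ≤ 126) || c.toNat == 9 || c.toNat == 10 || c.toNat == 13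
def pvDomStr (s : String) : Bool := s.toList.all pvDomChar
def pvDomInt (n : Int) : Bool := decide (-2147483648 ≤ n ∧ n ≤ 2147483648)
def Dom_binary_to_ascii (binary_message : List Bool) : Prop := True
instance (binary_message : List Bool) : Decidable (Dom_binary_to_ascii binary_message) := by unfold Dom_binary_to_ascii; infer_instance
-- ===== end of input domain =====

-- B replaces A's bit-string + slice-and-reparse pipeline by one pass with an integer
-- accumulator and a bit counter (objective: simpler, one traversal, no intermediate string).

-- ===== PORT A =====

-- helper of A: build the '0'/'1' string
def binary_convertor_to_str (values : List Bool) : String :=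
  values.foldl (fun output_str value =>
    if value then output_str ++ "1" else output_str ++ "0") ""

-- hand port of `int(bit, 2)`: exact on the nonempty '0'/'1' strings binary_to_ascii
-- feeds it (no whitespace/sign/underscore/prefix cases ever arise there)
def intOfBin (s : String) : Int :=
  s.toList.foldl (fun a c => a * 2 + (if c = '1' then 1 else 0)) 0

def binary_to_ascii (binary_message : List Bool) : String :=
  let bm := binary_convertor_to_str binary_message
  (PySem.List.pyRange 0 (PySem.Str.len bm) 8).foldl
    (fun ascii_message i =>
      let bit := PySem.Str.slice bm (some i) (some (i + 8))
      let ascii_char := Char.ofNat (intOfBin bit).toNat   -- chr(...): in range, < 256 here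
      ascii_message ++ String.ofList [ascii_char]) ""

-- ===== PORT B =====

-- B's loop: acc/cnt accumulator, emit a char every 8 bits, flush a partial final group
def goB : List Bool → Int → Nat → List Char → List Char
  | [], acc, cnt, out => if cnt ≠ 0 then out ++ [Char.ofNat acc.toNat] else out
  | value :: t, acc, cnt, out =>
      if cnt + 1 = 8 then goB t 0 0 (out ++ [Char.ofNat (acc * 2 + (if value then 1 else 0)).toNat])
      else goB t (acc * 2 + (if value then 1 else 0)) (cnt + 1) out

def binary_to_ascii_alt (binary_message : List Bool) : String :=
  String.ofList (goB binary_message 0 0 [])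

-- ===== PRECONDITION & SPEC =====
def Spec_binary_to_ascii (binary_message : List Bool) (out : String) : Prop := out = binary_to_ascii_alt binary_message
instance (binary_message : List Bool) (out : String) : Decidable (Spec_binary_to_ascii binary_message out) := by unfold Spec_binary_to_ascii; infer_instance

-- ===== CLAIM (what is proved, stated in full; the proofs are below) =====
def Claim_equal_binary_to_ascii : Prop := ∀ (binary_message : List Bool), Dom_binary_to_ascii binary_message → Spec_binary_to_ascii binary_message (binary_to_ascii binary_message)

-- ===== LEMMAS AND PROOFS =====

-- the value of a group of bits, big-endian, as both programs compute it
def bitsVal (l : List Bool) : Int :=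
  l.foldl (fun a b => a * 2 + (if b then 1 else 0)) 0

-- reference: the chunked-by-8 result both ports are proved equal to
def refChunks (l : List Bool) : List Char :=
  if _h : l = [] then []
  else Char.ofNat (bitsVal (l.take 8)).toNat :: refChunks (l.drop 8)
  termination_by l.length
  decreasing_by cases l with
    | nil => exact absurd rfl _h
    | cons b t => simp

theorem refChunks_nil : refChunks [] = [] := by rw [refChunks]; simp

theorem refChunks_cons (l : List Bool) (h : l ≠ []) :
    refChunks l = Char.ofNat (bitsVal (l.take 8)).toNat :: refChunks (l.drop 8) := by
  rw [refChunks]; simp [h]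

def bitChar (b : Bool) : Char := if b then '1' else '0'

theorem bcts_toList (values : List Bool) (s : String) :
    (values.foldl (fun output_str value =>
      if value then output_str ++ "1" else output_str ++ "0") s).toList
      = s.toList ++ values.map bitChar := by
  induction values generalizing s with
  | nil => simp
  | cons b t ih =>
    cases b <;> simp [List.foldl_cons, ih, bitChar]

theorem intOfBin_map (l : List Bool) :
    intOfBin (String.ofList (l.map bitChar)) = bitsVal l := by
  unfold intOfBin bitsVal
  rw [String.toList_ofList, List.foldl_map]
  exact PySem.List.foldl_congr_mem _ _ _ _ (fun a b _ => by cases b <;> simp [bitChar])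

-- step-8 range unfolds one element at a time
theorem pyRange8_cons (j n : Int) (h : j < n) :
    PySem.List.pyRange j n 8 = j :: PySem.List.pyRange (j + 8) n 8 := by
  rw [PySem.List.pyRange_of_pos j n (by norm_num),
      PySem.List.pyRange_of_pos (j + 8) n (by norm_num)]
  have h8 : ((n - j + 8 - 1) / 8).toNat = (if j + 8 < n then ((n - (j + 8) + 8 - 1) / 8).toNat else 0) + 1 := by
    split <;> omega
  rw [if_pos h, h8, List.range_succ_eq_map]
  simp only [List.map_cons, List.map_map, Function.comp]
  congr 1
  · push_cast; ring
  · apply List.map_congr_left; intro k _; simp [Function.comp]; push_cast; ring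

theorem pyRange8_nil (j n : Int) (h : n ≤ j) : PySem.List.pyRange j n 8 = [] := by
  rw [PySem.List.pyRange_of_pos j n (by norm_num), if_neg (by omega)]
  simp

-- A's loop, over the char list cs, equals the reference applied to the remaining bits
theorem loopA (bs : List Bool) (j : Nat) (acc : String) :
    ((PySem.List.pyRange (j : Int) ((bs.map bitChar).length : Int) 8).foldl
      (fun ascii_message i =>
        ascii_message ++ String.ofList
          [Char.ofNat (intOfBin (PySem.Str.slice (String.ofList (bs.map bitChar)) (some i) (some (i + 8)))).toNat]) acc)
    = acc ++ String.ofList (refChunks (bs.drop j)) := by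
  generalize hm : bs.length - j = m
  induction m using Nat.strong_induction_on generalizing j acc with
  | _ m ih =>
  by_cases hj' : bs.length ≤ j
  · rw [pyRange8_nil _ _ (by simp; exact_mod_cast hj')]
    have : bs.drop j = [] := by simp [List.drop_eq_nil_iff]; omega
    simp [this, refChunks_nil]
  · have hj : j < bs.length := by omega
    rw [pyRange8_cons _ _ (by simp; exact_mod_cast hj)]
    rw [List.foldl_cons]
    have hslice : PySem.Str.slice (String.ofList (bs.map bitChar)) (some (j : Int)) (some ((j : Int) + 8))
        = String.ofList ((bs.drop j).take 8 |>.map bitChar) := by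
      have : ((j : Int) + 8) = ((j : Int) + ((8 : Nat) : Int)) := by norm_num
      simp only [PySem.Str.slice, PySem.Chars.slice, String.toList_ofList, this,
        PySem.List.slice_natCast_add]
      rw [← List.map_drop, ← List.map_take]
    by_cases hstop : bs.length ≤ j + 8
    · -- last (possibly partial) chunk
      have hnil : PySem.List.pyRange ((j : Int) + 8) ((bs.map bitChar).length : Int) 8 = [] := by
        apply pyRange8_nil; simp; exact_mod_cast hstop
      rw [hnil]
      simp only [List.foldl_nil, hslice, intOfBin_map]
      have hdj : bs.drop j ≠ [] := by simp [List.drop_eq_nil_iff]; omega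
      have hdrop8 : bs.drop (j + 8) = [] := by simp [List.drop_eq_nil_iff]; omega
      rw [refChunks_cons _ hdj, List.drop_drop, hdrop8, refChunks_nil]
    · -- a full chunk followed by more
      have := ih (bs.length - (j + 8)) (by omega) (j + 8) (acc ++ String.ofList
          [Char.ofNat (intOfBin (String.ofList ((bs.drop j).take 8 |>.map bitChar))).toNat]) (by omega)
      push_cast at this ⊢
      rw [hslice, this]
      have hdj : bs.drop j ≠ [] := by simp [List.drop_eq_nil_iff]; omega
      rw [refChunks_cons _ hdj, List.drop_drop, intOfBin_map]
      apply String.toList_injective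
      simp

theorem A_eq_ref (bs : List Bool) :
    binary_to_ascii bs = String.ofList (refChunks bs) := by
  unfold binary_to_ascii
  have hbm : binary_convertor_to_str bs = String.ofList (bs.map bitChar) := by
    have := bcts_toList bs ""
    apply String.toList_injective
    simpa using this
  simp only [hbm, PySem.Str.len, String.toList_ofList]
  have := loopA bs 0 ""
  simpa using this

-- B's loop on a short tail (fewer than 8 remaining bits counting cnt): flush
theorem goB_small (bs : List Bool) (acc : Int) (cnt : Nat) (out : List Char)
    (h : cnt + bs.length < 8) :
    goB bs acc cnt out =
      if cnt + bs.length ≠ 0 then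
        out ++ [Char.ofNat (bs.foldl (fun a b => a * 2 + (if b then 1 else 0)) acc).toNat]
      else out := by
  induction bs generalizing acc cnt out with
  | nil => simp [goB]
  | cons b t ih =>
    rw [goB]
    rw [if_neg (by simp at h ⊢; omega)]
    rw [ih _ _ _ (by simp at h ⊢; omega)]
    have h1 : cnt + 1 + t.length ≠ 0 := by omega
    have h2 : cnt + (b :: t).length ≠ 0 := by simp
    rw [if_pos h1, if_pos h2]
    rfl

-- B's loop eats a full group of 8 bits and emits one char
theorem goB_group (p : List Bool) (rest : List Bool) (acc : Int) (cnt : Nat) (out : List Char)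
    (hne : p ≠ []) (hlen : cnt + p.length = 8) :
    goB (p ++ rest) acc cnt out =
      goB rest 0 0 (out ++ [Char.ofNat (p.foldl (fun a b => a * 2 + (if b then 1 else 0)) acc).toNat]) := by
  induction p generalizing acc cnt with
  | nil => exact absurd rfl hne
  | cons b t ih =>
    rw [List.cons_append, goB]
    by_cases ht : t = []
    · subst ht
      simp at hlen
      rw [if_pos (by omega)]
      rfl
    · have htpos : 0 < t.length := List.length_pos_of_ne_nil ht
      rw [if_neg (by simp at hlen; omega)]
      rw [ih _ _ ht (by simp at hlen; omega)]
      rfl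

theorem goB_ref (bs : List Bool) (out : List Char) :
    goB bs 0 0 out = out ++ refChunks bs := by
  generalize hm : bs.length = m
  induction m using Nat.strong_induction_on generalizing bs out with
  | _ m ih =>
    by_cases h8 : bs.length < 8
    · rw [goB_small bs 0 0 out (by omega)]
      rcases h : bs with _ | ⟨c, t⟩
      · simp [refChunks]
      · rw [← h]
        have hne : bs.length ≠ 0 := by rw [h]; simp
        rw [if_pos (by omega)]
        rw [refChunks_cons bs (by rw [h]; simp)]
        have ht : bs.take 8 = bs := List.take_of_length_le (by omega)
        have hd : bs.drop 8 = [] := by simp [List.drop_eq_nil_iff]; omega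
        rw [ht, hd, refChunks_nil]
        simp [bitsVal]
    · have hsplit : bs = bs.take 8 ++ bs.drop 8 := (List.take_append_drop 8 bs).symm
      have hne : bs.take 8 ≠ [] := by
        intro hc
        have hc2 := congrArg List.length hc
        simp at hc2
        exact h8 (by rw [hc2]; simp)
      have hlen8 : (bs.take 8).length = 8 := by simp; omega
      conv_lhs => rw [hsplit]
      rw [goB_group (bs.take 8) (bs.drop 8) 0 0 out hne (by omega)]
      rw [ih (bs.drop 8).length (by rw [List.length_drop]; omega) (bs.drop 8) _ rfl]
      rw [refChunks_cons bs (by intro h; rw [h] at hlen8; simp at hlen8)]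
      simp [bitsVal]

theorem B_eq_ref (bs : List Bool) :
    binary_to_ascii_alt bs = String.ofList (refChunks bs) := by
  unfold binary_to_ascii_alt
  rw [goB_ref bs []]
  simp

-- ===== VERDICT (by name: the statement is the Claim_ definition above) =====
theorem binary_to_ascii_spec : Claim_equal_binary_to_ascii := by
  intro bs _
  unfold Spec_binary_to_ascii
  rw [A_eq_ref, B_eq_ref]
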